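-- pv_equiv track=rewrite | github.com/mromanella/advent_of_code_2020 | day_10/answer.py | part_1
-- ===== SOURCE A (Python) =====
-- from typing import List, Set
--
-- def part_1(lines: List[str]) -> int:
--     diffs = []
--     joltages = sorted([int(line) for line in lines])
--     j = 0
--     max_joltage = joltages[-1] + 3
--     joltages.append(max_joltage)
--     for joltage in joltages:
--         diff = joltage - j
--         diffs.append(diff)
--         j = joltage
--     return diffs.count(1) * diffs.count(3)
-- ===== SOURCE B (Python) =====
-- def part_1(lines):
--     values = {int(line) for line in lines}
--     lo = min(values)
--     ones = (lo == 1) + sum(v + 1 in values for v in values)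
--     threes = 1 + (lo == 3) + sum(
--         v + 1 not in values and v + 2 not in values and v + 3 in values
--         for v in values
--     )
--     return ones * threes
-- ===== Notes on version B (the rewrite author's own statement) =====
-- stated objective: alternative
-- what changed: B replaces A's sort + diffs-list + two .count scans by a sort-free set algorithm: it builds the set of joltages and counts gap-1 pairs as members v with v+1 in the set, and gap-3 pairs as members v with v+3 in the set but v+1,v+2 absent, adding the initial step (min==1 / min==3) and the always-+3 final device step.
import Mathlib
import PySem

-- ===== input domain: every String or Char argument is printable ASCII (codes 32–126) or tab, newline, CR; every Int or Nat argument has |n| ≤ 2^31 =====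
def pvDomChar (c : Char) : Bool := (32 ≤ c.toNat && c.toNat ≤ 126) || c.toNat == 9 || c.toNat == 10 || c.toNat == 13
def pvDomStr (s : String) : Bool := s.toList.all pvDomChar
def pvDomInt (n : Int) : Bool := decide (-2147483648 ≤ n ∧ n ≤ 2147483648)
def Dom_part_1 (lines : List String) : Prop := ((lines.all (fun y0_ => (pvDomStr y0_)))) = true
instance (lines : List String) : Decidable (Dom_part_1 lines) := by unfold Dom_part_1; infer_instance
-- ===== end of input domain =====

-- B drops the sort and the diffs list entirely: it builds the SET of joltages and counts
-- gap-1 / gap-3 successor pairs by set-membership tests (alternative algorithm, same result).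

-- ===== PORT A =====
def part_1 (lines : List String) : Int :=
  let joltages := PySem.List.sorted (lines.map (fun line => (PySem.Int.ofStr? line).getD 0)) (fun x => x) false
  let j : Int := 0
  let max_joltage := (PySem.List.pyGet? joltages (-1)).getD 0 + 3
  let joltages := joltages ++ [max_joltage]
  let res := joltages.foldl (fun (st : List Int × Int) joltage => (st.1 ++ [joltage - st.2], joltage)) ([], j)
  (PySem.List.count res.1 1 : Int) * (PySem.List.count res.1 3 : Int)

-- ===== PORT B =====
def part_1_alt (lines : List String) : Int :=
  let values := PySem.Set.ofList (lines.map (fun line => (PySem.Int.ofStr? line).getD 0))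
  let lo := (PySem.List.min? values (fun x => x)).getD 0
  let ones : Int := (if lo = 1 then 1 else 0) +
    (values.map (fun v => if decide (v + 1 ∈ values) then (1 : Int) else 0)).sum
  let threes : Int := 1 + (if lo = 3 then 1 else 0) +
    (values.map (fun v => if decide (v + 1 ∉ values ∧ v + 2 ∉ values ∧ v + 3 ∈ values) then (1 : Int) else 0)).sum
  ones * threes

-- ===== PRECONDITION & SPEC =====
-- Pre_ excludes exactly the inputs on which Python A raises: the empty list (IndexError on
-- joltages[-1]) and lists with a line int() cannot parse (ValueError).
def Pre_part_1 (lines : List String) : Prop :=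
  lines ≠ [] ∧ ∀ l ∈ lines, (PySem.Int.ofStr? l).isSome = true
instance (lines : List String) : Decidable (Pre_part_1 lines) := by unfold Pre_part_1; infer_instance
def pvWitness_part_1 : List String := ["1", "4", "5", "7"]

def Spec_part_1 (lines : List String) (out : Int) : Prop := out = part_1_alt lines
instance (lines : List String) (out : Int) : Decidable (Spec_part_1 lines out) := by unfold Spec_part_1; infer_instance

-- ===== CLAIM (what is proved, stated in full; the proofs are below) =====
def Claim_equal_part_1 : Prop := ∀ (lines : List String), Dom_part_1 lines → Pre_part_1 lines → Spec_part_1 lines (part_1 lines)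

-- ===== LEMMAS AND PROOFS =====

lemma pvLastD_cons (x j : Int) (xs : List Int) : xs.getLast?.getD x = (x :: xs).getLast?.getD j := by
  cases xs with
  | nil => simp
  | cons h t =>
    cases hl : (h :: t).getLast? with
    | none => simp [List.getLast?_eq_none_iff] at hl
    | some z => simp [hl]

/-- The list of consecutive differences of `c`, starting from previous value `j`. -/
def pvDiffs : Int → List Int → List Int
  | _, [] => []
  | j, x :: xs => (x - j) :: pvDiffs x xs

lemma foldA_eq (c : List Int) (acc : List Int) (j : Int) :
    c.foldl (fun (st : List Int × Int) joltage => (st.1 ++ [joltage - st.2], joltage)) (acc, j)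
      = (acc ++ pvDiffs j c, c.getLastD j) := by
  induction c generalizing acc j with
  | nil => simp [pvDiffs]
  | cons x xs ih =>
    simp [List.foldl, ih, pvDiffs]
    exact pvLastD_cons x j xs

lemma pvDiffs_append_singleton (c : List Int) (j x : Int) :
    pvDiffs j (c ++ [x]) = pvDiffs j c ++ [x - c.getLastD j] := by
  induction c generalizing j with
  | nil => simp [pvDiffs]
  | cons y ys ih =>
    simp [pvDiffs, ih]
    exact pvLastD_cons y j ys

/-- Strip consecutive duplicates (on a sorted list: the strictly increasing dedup). -/
def pvUniq : List Int → List Int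
  | [] => []
  | [x] => [x]
  | x :: y :: r => if x = y then pvUniq (y :: r) else x :: pvUniq (y :: r)

lemma mem_pvUniq (s : List Int) (a : Int) : a ∈ pvUniq s ↔ a ∈ s := by
  induction s with
  | nil => simp [pvUniq]
  | cons x xs ih =>
    cases xs with
    | nil => simp [pvUniq]
    | cons y r =>
      by_cases h : x = y
      · subst h
        rw [show pvUniq (x :: x :: r) = pvUniq (x :: r) from by simp [pvUniq], ih]
        simp [List.mem_cons]
      · simp only [pvUniq, if_neg h, List.mem_cons, ih]

lemma head?_pvUniq (s : List Int) : (pvUniq s).head? = s.head? := by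
  induction s with
  | nil => rfl
  | cons x xs ih =>
    cases xs with
    | nil => rfl
    | cons y r =>
      by_cases h : x = y
      · subst h
        simpa [pvUniq] using ih
      · simp [pvUniq, h]

lemma pairwise_lt_pvUniq (s : List Int) (hs : s.Pairwise (· ≤ ·)) :
    (pvUniq s).Pairwise (· < ·) := by
  induction s with
  | nil => simp [pvUniq]
  | cons x xs ih =>
    cases xs with
    | nil => simp [pvUniq]
    | cons y r =>
      by_cases h : x = y
      · subst h
        simpa [pvUniq] using ih hs.tail
      · rw [List.pairwise_cons] at hs
        simp only [pvUniq, if_neg h]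
        refine List.pairwise_cons.mpr ⟨?_, ih hs.2⟩
        intro v hv
        rw [mem_pvUniq] at hv
        have hxy : x < y := lt_of_le_of_ne (hs.1 y (by simp)) h
        rcases List.mem_cons.mp hv with rfl | hvr
        · exact hxy
        · exact lt_of_lt_of_le hxy ((List.pairwise_cons.mp hs.2).1 v hvr)

lemma count_pvDiffs_pvUniq (k : Int) (hk : k ≠ 0) (s : List Int) :
    ∀ j : Int, (pvDiffs j s).count k = (pvDiffs j (pvUniq s)).count k := by
  induction s with
  | nil => intro j; rfl
  | cons x xs ih =>
    cases xs with
    | nil => intro j; rfl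
    | cons y r =>
      intro j
      by_cases h : x = y
      · subst h
        rw [show pvUniq (x :: x :: r) = pvUniq (x :: r) from by simp [pvUniq], ← ih j]
        show ((x - j) :: (x - x) :: pvDiffs x r).count k = ((x - j) :: pvDiffs x r).count k
        have h0 : ((x : Int) - x == k) = false := by
          simp only [beq_eq_false_iff_ne, ne_eq]
          omega
        simp only [List.count_cons]
        rw [h0]
        simp
      · rw [show pvUniq (x :: y :: r) = x :: pvUniq (y :: r) from by simp [pvUniq, h]]
        show ((x - j) :: pvDiffs x (y :: r)).count k = ((x - j) :: pvDiffs x (pvUniq (y :: r))).count k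
        simp only [List.count_cons, ih x]

lemma head_succ_mem (x : Int) (k : Int) (xs : List Int) (hpw : xs.Pairwise (· < ·))
    (hgt : ∀ v ∈ xs, x < v) (hbelow : ∀ i, 0 < i → i < k → x + i ∉ xs) :
    (x + k ∈ xs ↔ xs.head? = some (x + k)) := by
  cases xs with
  | nil => simp
  | cons y ys =>
    rw [List.pairwise_cons] at hpw
    constructor
    · intro hmem
      rcases List.mem_cons.mp hmem with he | hys
      · simp [he]
      · have h1 : y < x + k := hpw.1 _ hys
        have h2 : x < y := hgt y (by simp)
        have h3 : x + (y - x) ∉ y :: ys := hbelow (y - x) (by omega) (by omega)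
        exact absurd (by simp [show x + (y - x) = y by ring]) h3
    · intro hh
      simp only [List.head?_cons, Option.some.injEq] at hh
      simp [hh]

lemma count_one_pvDiffs (l : List Int) (hl : l.Pairwise (· < ·)) :
    ∀ j : Int, (pvDiffs j l).count 1
      = (if l.head? = some (j + 1) then 1 else 0) + l.countP (fun v => decide (v + 1 ∈ l)) := by
  induction l with
  | nil => intro j; simp [pvDiffs]
  | cons x xs ih =>
    intro j
    rw [List.pairwise_cons] at hl
    have hgt := hl.1
    have hmem1 : (x + 1 ∈ xs ↔ xs.head? = some (x + 1)) :=
      head_succ_mem x 1 xs hl.2 hgt (by intro i h1 h2; omega)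
    have hx1 : (x + 1 ∈ x :: xs) ↔ xs.head? = some (x + 1) := by
      rw [List.mem_cons, ← hmem1]
      constructor
      · rintro (he | h)
        · omega
        · exact h
      · exact Or.inr
    show ((x - j) :: pvDiffs x xs).count 1 = _
    rw [List.count_cons, ih hl.2 x, List.countP_cons]
    have hcongr : xs.countP (fun v => decide (v + 1 ∈ xs))
        = xs.countP (fun v => decide (v + 1 ∈ x :: xs)) := by
      refine List.countP_congr ?_
      intro v hv
      have : x < v := hgt v hv
      simp [List.mem_cons, show ¬ (v + 1 = x) by omega]
    rw [hcongr,
      show (decide (x + 1 ∈ x :: xs)) = decide (xs.head? = some (x + 1)) from by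
        simp only [decide_eq_decide]; exact hx1]
    generalize xs.countP (fun v => decide (v + 1 ∈ x :: xs)) = C
    have hxe' : ((x:Int) - j = 1) ↔ (x = j + 1) := by omega
    by_cases hh : xs.head? = some (x + 1) <;> by_cases hxj : x = j + 1 <;>
      simp [hh, hxj, hxe'] <;> omega

lemma count_three_pvDiffs (l : List Int) (hl : l.Pairwise (· < ·)) :
    ∀ j : Int, (pvDiffs j l).count 3
      = (if l.head? = some (j + 3) then 1 else 0)
        + l.countP (fun v => decide (v + 1 ∉ l ∧ v + 2 ∉ l ∧ v + 3 ∈ l)) := by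
  induction l with
  | nil => intro j; simp [pvDiffs]
  | cons x xs ih =>
    intro j
    rw [List.pairwise_cons] at hl
    have hgt := hl.1
    -- the head-shaped characterisation of a 3-gap at x
    have hpx : (x + 1 ∉ x :: xs ∧ x + 2 ∉ x :: xs ∧ x + 3 ∈ x :: xs)
        ↔ xs.head? = some (x + 3) := by
      have hred : ∀ i : Int, 0 < i → (x + i ∈ x :: xs ↔ x + i ∈ xs) := by
        intro i hi
        rw [List.mem_cons]
        constructor
        · rintro (he | h)
          · omega
          · exact h
        · exact Or.inr
      rw [hred 1 (by omega), hred 2 (by omega), hred 3 (by omega)]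
      constructor
      · rintro ⟨h1, h2, h3⟩
        exact (head_succ_mem x 3 xs hl.2 hgt
          (by intro i hi1 hi2
              interval_cases i
              · exact h1
              · exact h2)).mp h3
      · intro hh
        cases xs with
        | nil => simp at hh
        | cons y ys =>
          simp only [List.head?_cons, Option.some.injEq] at hh
          subst hh
          rw [List.pairwise_cons] at hl
          have hys : ∀ v ∈ ys, x + 3 < v := hl.2.1
          refine ⟨?_, ?_, by simp⟩
          · intro hc
            rcases List.mem_cons.mp hc with he | h'
            · omega
            · have := hys _ h'; omega
          · intro hc
            rcases List.mem_cons.mp hc with he | h'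
            · omega
            · have := hys _ h'; omega
    show ((x - j) :: pvDiffs x xs).count 3 = _
    rw [List.count_cons, ih hl.2 x, List.countP_cons]
    have hcongr : xs.countP (fun v => decide (v + 1 ∉ xs ∧ v + 2 ∉ xs ∧ v + 3 ∈ xs))
        = xs.countP (fun v => decide (v + 1 ∉ x :: xs ∧ v + 2 ∉ x :: xs ∧ v + 3 ∈ x :: xs)) := by
      refine List.countP_congr ?_
      intro v hv
      have : x < v := hgt v hv
      simp [List.mem_cons, show ¬ (v + 1 = x) by omega, show ¬ (v + 2 = x) by omega,
        show ¬ (v + 3 = x) by omega]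
    rw [hcongr,
      show (decide (x + 1 ∉ x :: xs ∧ x + 2 ∉ x :: xs ∧ x + 3 ∈ x :: xs))
          = decide (xs.head? = some (x + 3)) from by
        simp only [decide_eq_decide]; exact hpx]
    generalize xs.countP (fun v => decide (v + 1 ∉ x :: xs ∧ v + 2 ∉ x :: xs ∧ v + 3 ∈ x :: xs)) = C
    have hxe' : ((x:Int) - j = 3) ↔ (x = j + 3) := by omega
    by_cases hh : xs.head? = some (x + 3) <;> by_cases hxj : x = j + 3 <;>
      simp [hh, hxj, hxe'] <;> omega

theorem part_1_spec : Claim_equal_part_1 := by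
  intro lines _ hpre
  unfold Spec_part_1 part_1 part_1_alt
  simp only
  rw [PySem.List.sum_map_ite_one_zero, PySem.List.sum_map_ite_one_zero]
  set parsed := lines.map (fun line => (PySem.Int.ofStr? line).getD 0) with hparsed
  set s := PySem.List.sorted parsed (fun x => x) false with hs
  set values := PySem.Set.ofList parsed with hvalues
  -- basic facts
  have hpne : parsed ≠ [] := by
    rw [hparsed, Ne, List.map_eq_nil_iff]; exact hpre.1
  have hsne : s ≠ [] := by
    rw [hs, Ne, PySem.List.sorted_eq_nil_iff]; exact hpne
  have hspw : s.Pairwise (· ≤ ·) := PySem.List.sorted_pairwise parsed (fun x => x)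
  have hsmem : ∀ a : Int, a ∈ s ↔ a ∈ parsed := fun a => PySem.List.mem_sorted parsed (fun x => x) false a
  set d := pvUniq s with hd
  have hdpw : d.Pairwise (· < ·) := pairwise_lt_pvUniq s hspw
  have hdnodup : d.Nodup := hdpw.imp (fun h => ne_of_lt h)
  have hdmem : ∀ a : Int, a ∈ d ↔ a ∈ values := by
    intro a
    rw [hd, mem_pvUniq, hsmem, hvalues, PySem.Set.mem_ofList]
  have hvperm : values.Perm d := by
    refine (List.perm_ext_iff_of_nodup (PySem.Set.nodup_ofList parsed) hdnodup).mpr ?_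
    intro a; rw [hdmem]
  -- head of d and the min of values coincide
  obtain ⟨y0, t0, hcons⟩ := List.exists_cons_of_ne_nil hsne
  have hdhead : d.head? = some y0 := by rw [hd, head?_pvUniq, hcons]; rfl
  have hy0d : y0 ∈ d := by
    rcases d with _ | ⟨z, zs⟩
    · simp at hdhead
    · simp only [List.head?_cons, Option.some.injEq] at hdhead; simp [hdhead]
  have hvne : values ≠ [] := by
    intro hv
    have := (hdmem y0).mp hy0d
    rw [hv] at this; simp at this
  obtain ⟨m, hm⟩ : ∃ m, PySem.List.min? values (fun x : Int => x) = some m := by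
    cases hmm : PySem.List.min? values (fun x : Int => x) with
    | none => exact absurd ((PySem.List.min?_eq_none_iff values _).mp hmm) hvne
    | some m => exact ⟨m, rfl⟩
  have hmeq : m = y0 := by
    have h1 : m ≤ y0 := PySem.List.min?_isMin hm y0 ((hdmem y0).mp hy0d)
    have h2 : y0 ≤ m := by
      have hmd : m ∈ d := (hdmem m).mpr (PySem.List.min?_mem hm)
      rcases d with _ | ⟨z, zs⟩
      · simp at hmd
      · simp only [List.head?_cons, Option.some.injEq] at hdhead
        subst hdhead
        rw [List.pairwise_cons] at hdpw
        rcases List.mem_cons.mp hmd with rfl | hm'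
        · exact le_refl _
        · exact le_of_lt (hdpw.1 m hm')
    omega
  -- the last element A appends
  have hlast : PySem.List.pyGet? s (-1) = some (s.getLastD 0) := by
    rw [PySem.List.pyGet?_neg_one, hcons]
    cases h : (y0 :: t0).getLast? with
    | none => simp [List.getLast?_eq_none_iff] at h
    | some z => simp [h]
  rw [hlast, foldA_eq, hm]
  simp only [Option.getD_some, List.nil_append]
  rw [pvDiffs_append_singleton]
  have hd3 : s.getLastD 0 + 3 - s.getLastD 0 = 3 := by ring
  rw [hd3]
  simp only [PySem.List.count_eq, List.count_append]
  have e1 : List.count (1 : Int) [3] = 0 := by decide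
  have e3 : List.count (3 : Int) [3] = 1 := by decide
  rw [e1, e3]
  -- move the diff counts to the strictly increasing dedup d
  rw [count_pvDiffs_pvUniq 1 (by norm_num) s 0, count_pvDiffs_pvUniq 3 (by norm_num) s 0, ← hd]
  rw [count_one_pvDiffs d hdpw 0, count_three_pvDiffs d hdpw 0]
  -- move B's countP over values to countP over d
  have hcp1 : values.countP (fun v => decide (v + 1 ∈ values))
      = d.countP (fun v => decide (v + 1 ∈ d)) := by
    rw [hvperm.countP_eq]
    exact List.countP_congr (by intro v _; simp [hdmem])
  have hcp3 : values.countP (fun v => decide (v + 1 ∉ values ∧ v + 2 ∉ values ∧ v + 3 ∈ values))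
      = d.countP (fun v => decide (v + 1 ∉ d ∧ v + 2 ∉ d ∧ v + 3 ∈ d)) := by
    rw [hvperm.countP_eq]
    exact List.countP_congr (by intro v _; simp [hdmem])
  rw [hcp1, hcp3, hdhead, hmeq]
  simp only [Option.some.injEq, zero_add]
  split_ifs <;> push_cast <;> ring
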